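-- pv_equiv track=rewrite | github.com/alikhan37544/Flex_it_out_Hackathon_Bajaj | hand_detection.py | get_hand_region
-- ===== SOURCE A (Python) =====
-- def get_hand_region(cx, cy, frame_width, frame_height, region_size=100):
--     regions = {
--         "Top-Left": (0, 0, region_size, region_size),
--         "Top-Right": (frame_width - region_size, 0, region_size, region_size),
--         "Bottom-Left": (0, frame_height - region_size, region_size, region_size),
--         "Bottom-Right": (frame_width - region_size, frame_height - region_size, region_size, region_size)
--     }
--     for name, (rx, ry, rw, rh) in regions.items():
--         if rx <= cx <= rx + rw and ry <= cy <= ry + rh: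
--             return name
--     return "None"
-- ===== SOURCE B (Python) =====
-- def get_hand_region(cx, cy, frame_width, frame_height, region_size=100):
--     if 0 <= cx <= region_size:
--         horiz = "Left"
--     elif frame_width - region_size <= cx <= frame_width:
--         horiz = "Right"
--     else:
--         horiz = None
--     if 0 <= cy <= region_size:
--         vert = "Top"
--     elif frame_height - region_size <= cy <= frame_height:
--         vert = "Bottom"
--     else:
--         vert = None
--     if horiz is None or vert is None:
--         return "None"
--     return vert + "-" + horiz
-- ===== Notes on version B (the rewrite author's own statement) =====
-- stated objective: simpler
-- what changed: Replaces the dict of four rectangles and the first-match loop by independent classification of the x and y axes into Left/Right and Top/Bottom bands, joining the two labels; elif order (Left before Right, Top before Bottom) preserves the loop's first-match precedence on overlapping bands.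
import Mathlib
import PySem

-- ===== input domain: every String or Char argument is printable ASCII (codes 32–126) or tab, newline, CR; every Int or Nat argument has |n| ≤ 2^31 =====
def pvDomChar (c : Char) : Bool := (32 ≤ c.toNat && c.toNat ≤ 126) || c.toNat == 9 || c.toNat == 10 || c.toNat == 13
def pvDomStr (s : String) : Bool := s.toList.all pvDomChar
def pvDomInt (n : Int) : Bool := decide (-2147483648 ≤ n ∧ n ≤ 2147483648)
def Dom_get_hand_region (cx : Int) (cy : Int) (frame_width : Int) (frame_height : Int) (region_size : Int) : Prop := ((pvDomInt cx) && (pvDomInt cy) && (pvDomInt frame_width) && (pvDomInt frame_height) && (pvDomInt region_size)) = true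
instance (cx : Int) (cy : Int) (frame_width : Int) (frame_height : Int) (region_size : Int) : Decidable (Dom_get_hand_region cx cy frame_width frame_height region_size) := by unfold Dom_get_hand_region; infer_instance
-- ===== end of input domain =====

-- ===== PORT A =====
-- B replaces the dict+first-match loop by independent axis classification (simpler decomposition).
-- A-side helper: the for-loop over regions.items(), first match wins, else "None".
def pvRegionLoop (cx : Int) (cy : Int) : List (String × (Int × Int × Int × Int)) → String
  | [] => "None"
  | (name, (rx, ry, rw, rh)) :: rest =>
    if rx ≤ cx ∧ cx ≤ rx + rw ∧ ry ≤ cy ∧ cy ≤ ry + rh then name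
    else pvRegionLoop cx cy rest

def get_hand_region (cx : Int) (cy : Int) (frame_width : Int) (frame_height : Int) (region_size : Int) : String :=
  let regions : List (String × (Int × Int × Int × Int)) :=
    [ ("Top-Left", (0, 0, region_size, region_size)),
      ("Top-Right", (frame_width - region_size, 0, region_size, region_size)),
      ("Bottom-Left", (0, frame_height - region_size, region_size, region_size)),
      ("Bottom-Right", (frame_width - region_size, frame_height - region_size, region_size, region_size)) ]
  pvRegionLoop cx cy regions

-- ===== PORT B =====
def get_hand_region_alt (cx : Int) (cy : Int) (frame_width : Int) (frame_height : Int) (region_size : Int) : String :=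
  let horiz : Option String :=
    if 0 ≤ cx ∧ cx ≤ region_size then some "Left"
    else if frame_width - region_size ≤ cx ∧ cx ≤ frame_width then some "Right"
    else none
  let vert : Option String :=
    if 0 ≤ cy ∧ cy ≤ region_size then some "Top"
    else if frame_height - region_size ≤ cy ∧ cy ≤ frame_height then some "Bottom"
    else none
  match horiz, vert with
  | some h, some v => v ++ "-" ++ h
  | _, _ => "None"

-- ===== PRECONDITION & SPEC =====
def Spec_get_hand_region (cx : Int) (cy : Int) (frame_width : Int) (frame_height : Int) (region_size : Int) (out : String) : Prop := out = get_hand_region_alt cx cy frame_width frame_height region_size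
instance (cx : Int) (cy : Int) (frame_width : Int) (frame_height : Int) (region_size : Int) (out : String) : Decidable (Spec_get_hand_region cx cy frame_width frame_height region_size out) := by unfold Spec_get_hand_region; infer_instance

-- ===== CLAIM (what is proved, stated in full; the proofs are below) =====
def Claim_equal_get_hand_region : Prop := ∀ (cx : Int) (cy : Int) (frame_width : Int) (frame_height : Int) (region_size : Int), Dom_get_hand_region cx cy frame_width frame_height region_size → Spec_get_hand_region cx cy frame_width frame_height region_size (get_hand_region cx cy frame_width frame_height region_size)

-- ===== LEMMAS AND PROOFS =====

-- ===== VERDICT (by name: the statement is the Claim_ definition above) =====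
theorem get_hand_region_spec : Claim_equal_get_hand_region := by
  intro cx cy fw fh rs _
  unfold Spec_get_hand_region get_hand_region get_hand_region_alt
  simp only [pvRegionLoop]
  split_ifs <;> first | rfl | omega
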